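-- pv_equiv track=rewrite | github.com/DinhAnh-Nguyen/Lexical-Analyzer | src/utils.py | validate_list_format
-- ===== SOURCE A (Python) =====
-- def validate_list_format(input_string: str) -> bool:
--     """
--     Validate that input string is in proper list format.
--
--     Args:
--         input_string: String to validate
--
--     Returns:
--         True if format is valid, False otherwise
--     """
--     # Check for proper bracket structure
--     if not (input_string.strip().startswith('[') and input_string.strip().endswith(']')):
--         return False
--
--     # Check for balanced brackets
--     bracket_count = 0
--     for char in input_string:
--         if char == '[':
--             bracket_count += 1
--         elif char == ']':
--             bracket_count -= 1
--             if bracket_count < 0: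
--                 return False
--
--     return bracket_count == 0
-- ===== SOURCE B (Python) =====
-- def validate_list_format(input_string: str) -> bool:
--     """Validate list format by rewriting: cancel "[]" pairs to a normal form."""
--     stripped = input_string.strip()
--     if not (stripped.startswith('[') and stripped.endswith(']')):
--         return False
--     brackets = ''.join(c for c in input_string if c in '[]')
--     while '[]' in brackets:
--         brackets = brackets.replace('[]', '')
--     return brackets == ''
-- ===== Notes on version B (the rewrite author's own statement) =====
-- stated objective: alternative
-- what changed: Replaced the running-counter scan by a string-rewriting algorithm: keep only the bracket characters, repeatedly delete every adjacent open-close bracket pair until a fixpoint, and accept iff the normal form is empty.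
import Mathlib
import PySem

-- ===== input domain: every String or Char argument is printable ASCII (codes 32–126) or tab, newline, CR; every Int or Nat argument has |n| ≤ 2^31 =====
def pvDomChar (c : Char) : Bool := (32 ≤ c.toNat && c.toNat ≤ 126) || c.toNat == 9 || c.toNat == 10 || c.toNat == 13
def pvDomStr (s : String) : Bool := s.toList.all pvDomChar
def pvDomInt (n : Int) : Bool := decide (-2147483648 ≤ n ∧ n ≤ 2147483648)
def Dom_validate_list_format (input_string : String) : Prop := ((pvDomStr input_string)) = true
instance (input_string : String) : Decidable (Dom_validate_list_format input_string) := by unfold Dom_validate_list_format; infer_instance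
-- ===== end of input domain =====

-- B replaces A's running-counter scan by a string-rewriting algorithm (keep the brackets,
-- repeatedly delete "[]" until a fixpoint, accept iff empty): alternative decomposition, not faster.

-- ===== PORT A =====
-- the for-loop with its early 'return False' modeled as an Option state (none = returned False)
def vlfLoop : Option Int → List Char → Option Int
  | none, _ => none
  | some k, [] => some k
  | some k, c :: cs =>
      if c = '[' then vlfLoop (some (k + 1)) cs
      else if c = ']' then
        if k - 1 < 0 then none else vlfLoop (some (k - 1)) cs
      else vlfLoop (some k) cs

def validate_list_format (input_string : String) : Bool :=
  let s := PySem.Str.strip input_string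
  if !(PySem.Str.startswith s "[" && PySem.Str.endswith s "]") then false
  else
    match vlfLoop (some 0) input_string.toList with
    | none => false
    | some k => k == 0

-- ===== PORT B =====
-- helpers for the port of B's while loop; goeq/replace_eq_redOnce characterize
-- PySem.Chars.replace for the fixed pattern "[]", and redOnce_length_lt is the
-- termination measure cited by vlfReduce's decreasing_by
def redOnce : List Char → List Char
  | [] => []
  | [c] => [c]
  | c :: d :: t => if c = '[' ∧ d = ']' then redOnce t else c :: redOnce (d :: t)

lemma goeq : ∀ (fuel : Nat) (l acc : List Char), l.length ≤ fuel →
    PySem.Chars.replace.go ['[', ']'] [] fuel l acc = acc.reverse ++ redOnce l := by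
  intro fuel
  induction fuel with
  | zero =>
    intro l acc h
    have : l = [] := by cases l <;> simp_all
    subst this
    simp [PySem.Chars.replace.go, redOnce]
  | succ n ih =>
    intro l acc h
    match l with
    | [] => simp [PySem.Chars.replace.go, redOnce]
    | [c] =>
      rw [PySem.Chars.replace.go.eq_def]
      have hp : List.isPrefixOf ['[', ']'] [c] = false := by simp [List.isPrefixOf]
      simp only [hp, Bool.false_eq_true, if_false]
      rw [ih [] (c :: acc) (by simp)]
      simp [redOnce]
    | c :: d :: t =>
      rw [PySem.Chars.replace.go.eq_def]
      by_cases hcd : c = '[' ∧ d = ']'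
      · obtain ⟨rfl, rfl⟩ := hcd
        have hp : List.isPrefixOf ['[', ']'] ('[' :: ']' :: t) = true := by
          simp [List.isPrefixOf]
        simp only [hp, if_true, List.length_cons, List.drop_succ_cons,
          List.reverse_nil, List.nil_append]
        simp only [List.length_nil, List.drop_zero]
        rw [ih t acc (by simp at h ⊢; omega)]
        simp [redOnce]
      · have hp : List.isPrefixOf ['[', ']'] (c :: d :: t) = false := by
          simp only [List.isPrefixOf, Bool.and_eq_false_iff]
          rcases (not_and_or.mp hcd) with hc | hd
          · simp [show ¬ ('[' = c) from fun h => hc h.symm]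
          · simp [show ¬ (']' = d) from fun h => hd h.symm]
        simp only [hp, Bool.false_eq_true, if_false]
        rw [ih (d :: t) (c :: acc) (by simp at h ⊢; omega)]
        simp [redOnce, hcd]

lemma replace_eq_redOnce (l : List Char) :
    PySem.Chars.replace l ['[', ']'] [] = redOnce l := by
  rw [PySem.Chars.replace]
  simp [goeq l.length l [] le_rfl]

lemma redOnce_length_le (l : List Char) : (redOnce l).length ≤ l.length := by
  induction l using redOnce.induct with
  | case1 => simp [redOnce]
  | case2 c => simp [redOnce]
  | case3 c d t hcd ih =>
    simp only [redOnce, if_pos hcd]; simp at ih ⊢; omega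
  | case4 c d t hcd ih =>
    simp only [redOnce, if_neg hcd]; simp at ih ⊢; omega

lemma redOnce_length_lt (l : List Char) (h : ['[', ']'] <:+: l) :
    (redOnce l).length < l.length := by
  induction l using redOnce.induct with
  | case1 => simp at h
  | case2 c =>
    exfalso
    have := h.length_le; simp at this
  | case3 c d t hcd ih =>
    simp only [redOnce, if_pos hcd]
    have := redOnce_length_le t; simp; omega
  | case4 c d t hcd ih =>
    simp only [redOnce, if_neg hcd]
    have hi : ['[', ']'] <:+: (d :: t) := by
      rcases (List.infix_cons_iff).mp h with hp | hi
      · exfalso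
        rcases hp with ⟨r, hr⟩
        simp at hr
        exact hcd ⟨hr.1.symm, hr.2.1.symm⟩
      · exact hi
    have := ih hi; simp at this ⊢; omega

-- brackets = ''.join(c for c in input_string if c in '[]')
def vlfBrackets (l : List Char) : List Char :=
  l.filter (fun c => PySem.Chars.isIn [c] ['[', ']'])

-- while '[]' in brackets: brackets = brackets.replace('[]', '')
def vlfReduce (b : List Char) : List Char :=
  if h : PySem.Chars.isIn ['[', ']'] b = true then
    vlfReduce (PySem.Chars.replace b ['[', ']'] [])
  else b
termination_by b.length
decreasing_by
  rw [replace_eq_redOnce]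
  exact redOnce_length_lt b ((PySem.Chars.isIn_iff_infix _ _).mp h)

def validate_list_format_alt (input_string : String) : Bool :=
  let s := PySem.Str.strip input_string
  if !(PySem.Str.startswith s "[" && PySem.Str.endswith s "]") then false
  else vlfReduce (vlfBrackets input_string.toList) == []

-- ===== PRECONDITION & SPEC =====
def Spec_validate_list_format (input_string : String) (out : Bool) : Prop := out = validate_list_format_alt input_string
instance (input_string : String) (out : Bool) : Decidable (Spec_validate_list_format input_string out) := by unfold Spec_validate_list_format; infer_instance

-- ===== CLAIM (what is proved, stated in full; the proofs are below) =====
def Claim_equal_validate_list_format : Prop := ∀ (input_string : String), Dom_validate_list_format input_string → Spec_validate_list_format input_string (validate_list_format input_string)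

-- ===== LEMMAS AND PROOFS =====
lemma vlfLoop_redOnce (l : List Char) : ∀ k : Int, 0 ≤ k →
    vlfLoop (some k) (redOnce l) = vlfLoop (some k) l := by
  induction l using redOnce.induct with
  | case1 => intro k hk; simp [redOnce]
  | case2 c => intro k hk; simp [redOnce]
  | case3 c d t hcd ih =>
    intro k hk
    simp only [redOnce, if_pos hcd]
    obtain ⟨rfl, rfl⟩ := hcd
    rw [ih k hk]
    show vlfLoop (some k) t = vlfLoop (some k) ('[' :: ']' :: t)
    rw [show vlfLoop (some k) ('[' :: ']' :: t) = vlfLoop (some (k+1)) (']' :: t) from by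
      simp [vlfLoop]]
    rw [show vlfLoop (some (k+1)) (']' :: t) =
        if k + 1 - 1 < 0 then none else vlfLoop (some (k + 1 - 1)) t from by
      simp [vlfLoop]]
    have : ¬ (k + 1 - 1 < 0) := by omega
    rw [if_neg this, show k + 1 - 1 = k by ring]
  | case4 c d t hcd ih =>
    intro k hk
    simp only [redOnce, if_neg hcd]
    by_cases hc1 : c = '['
    · subst hc1
      show vlfLoop (some k) ('[' :: redOnce (d :: t)) = vlfLoop (some k) ('[' :: d :: t)
      rw [show ∀ u, vlfLoop (some k) ('[' :: u) = vlfLoop (some (k+1)) u from fun u => by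
        simp [vlfLoop]]
      exact ih (k + 1) (by omega)
    · by_cases hc2 : c = ']'
      · subst hc2
        rw [show ∀ u, vlfLoop (some k) (']' :: u) =
            if k - 1 < 0 then none else vlfLoop (some (k - 1)) u from fun u => by
          simp [vlfLoop]]
        rw [show ∀ u, vlfLoop (some k) (']' :: u) =
            if k - 1 < 0 then none else vlfLoop (some (k - 1)) u from fun u => by
          simp [vlfLoop]]
        by_cases hneg : k - 1 < 0
        · simp [hneg]
        · rw [if_neg hneg, if_neg hneg]
          exact ih (k - 1) (by omega)
      · rw [show ∀ u, vlfLoop (some k) (c :: u) = vlfLoop (some k) u from fun u => by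
          simp [vlfLoop, hc1, hc2]]
        rw [show ∀ u, vlfLoop (some k) (c :: u) = vlfLoop (some k) u from fun u => by
          simp [vlfLoop, hc1, hc2]]
        exact ih k hk

lemma vlfLoop_vlfReduce (b : List Char) (k : Int) (hk : 0 ≤ k) :
    vlfLoop (some k) (vlfReduce b) = vlfLoop (some k) b := by
  induction b using vlfReduce.induct with
  | case1 b h ih =>
    rw [vlfReduce, dif_pos h, ih, replace_eq_redOnce, vlfLoop_redOnce b k hk]
  | case2 b h => rw [vlfReduce, dif_neg h]

lemma not_infix_vlfReduce (b : List Char) : ¬ ['[', ']'] <:+: vlfReduce b := by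
  induction b using vlfReduce.induct with
  | case1 b h ih => rw [vlfReduce, dif_pos h]; exact ih
  | case2 b h =>
    rw [vlfReduce, dif_neg h]
    exact (PySem.Chars.isIn_eq_false_iff _ _).mp (by simpa using h)

lemma mem_redOnce {c : Char} {l : List Char} (h : c ∈ redOnce l) : c ∈ l := by
  induction l using redOnce.induct with
  | case1 => simp [redOnce] at h
  | case2 d => simpa [redOnce] using h
  | case3 a d t hcd ih =>
    simp only [redOnce, if_pos hcd] at h
    simp [ih h]
  | case4 a d t hcd ih =>
    simp only [redOnce, if_neg hcd] at h
    rcases List.mem_cons.mp h with rfl | h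
    · simp
    · simp [ih h]

lemma mem_vlfReduce {c : Char} {b : List Char} (h : c ∈ vlfReduce b) : c ∈ b := by
  induction b using vlfReduce.induct with
  | case1 b hb ih =>
    rw [vlfReduce, dif_pos hb] at h
    have := ih h
    rw [replace_eq_redOnce] at this
    exact mem_redOnce this
  | case2 b hb => rwa [vlfReduce, dif_neg hb] at h

-- all-'[' strings: the loop just adds the length

lemma vlfLoop_all_open (l : List Char) (hall : ∀ c ∈ l, c = '[') :
    ∀ k : Int, vlfLoop (some k) l = some (k + l.length) := by
  induction l with
  | nil => intro k; simp [vlfLoop]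
  | cons c t ih =>
    intro k
    have hc : c = '[' := hall c (by simp)
    subst hc
    rw [show vlfLoop (some k) ('[' :: t) = vlfLoop (some (k + 1)) t from by simp [vlfLoop]]
    rw [ih (fun c hc => hall c (by simp [hc]))]
    simp; ring_nf

lemma all_open_of_no_pair : ∀ (t : List Char), (∀ c ∈ t, c = '[' ∨ c = ']') →
    ¬ ['[', ']'] <:+: ('[' :: t) → ∀ c ∈ t, c = '[' := by
  intro t
  induction t with
  | nil => intro _ _ c hc; simp at hc
  | cons d t ih =>
    intro hbr hni
    have hd : d = '[' := by
      rcases hbr d (by simp) with h | h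
      · exact h
      · exfalso; apply hni
        subst h
        exact ⟨[], t, by simp⟩
    subst hd
    intro c hc
    rcases List.mem_cons.mp hc with rfl | hct
    · rfl
    · refine ih (fun x hx => hbr x (List.mem_cons_of_mem _ hx)) ?_ c hct
      intro hinf
      apply hni
      rcases hinf with ⟨sl, u, hu⟩
      exact ⟨'[' :: sl, u, by simp [← hu]⟩

lemma vlfLoop_ne_zero (r : List Char) (hbr : ∀ c ∈ r, c = '[' ∨ c = ']')
    (hni : ¬ ['[', ']'] <:+: r) (hne : r ≠ []) : vlfLoop (some 0) r ≠ some 0 := by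
  cases r with
  | nil => exact absurd rfl hne
  | cons c t =>
    rcases hbr c (by simp) with rfl | rfl
    · have hall := all_open_of_no_pair t (fun x hx => hbr x (List.mem_cons_of_mem _ hx)) hni
      rw [show vlfLoop (some 0) ('[' :: t) = vlfLoop (some 1) t from by simp [vlfLoop]]
      rw [vlfLoop_all_open t hall 1]
      intro h
      simp at h
      omega
    · have hnone : vlfLoop (some 0) (']' :: t) = none := by
        simp only [vlfLoop]
        norm_num
        intro h
        exact absurd h (by decide)
      rw [hnone]
      simp

lemma isIn_singleton (c : Char) :
    PySem.Chars.isIn [c] ['[', ']'] = (c = '[' ∨ c = ']' : Bool) := by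
  by_cases h : c = '[' ∨ c = ']'
  · rw [(PySem.Chars.isIn_iff_infix _ _).mpr ((List.singleton_infix_iff c _).mpr (by
      rcases h with rfl | rfl <;> simp))]
    simp [h]
  · rw [(PySem.Chars.isIn_eq_false_iff _ _).mpr (fun hinf => h (by
      have := (List.singleton_infix_iff c _).mp hinf
      simpa using this))]
    simp [h]

lemma vlfLoop_vlfBrackets (l : List Char) : ∀ k : Int,
    vlfLoop (some k) (vlfBrackets l) = vlfLoop (some k) l := by
  induction l with
  | nil => intro k; rfl
  | cons c t ih =>
    intro k
    by_cases hc1 : c = '['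
    · subst hc1
      rw [show vlfBrackets ('[' :: t) = '[' :: vlfBrackets t from by
        simp [vlfBrackets, List.filter, isIn_singleton]]
      rw [show ∀ u, vlfLoop (some k) ('[' :: u) = vlfLoop (some (k + 1)) u from fun u => by
        simp [vlfLoop]]
      rw [show ∀ u, vlfLoop (some k) ('[' :: u) = vlfLoop (some (k + 1)) u from fun u => by
        simp [vlfLoop]]
      exact ih (k + 1)
    · by_cases hc2 : c = ']'
      · subst hc2
        rw [show vlfBrackets (']' :: t) = ']' :: vlfBrackets t from by
          simp [vlfBrackets, List.filter, isIn_singleton]]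
        rw [show ∀ u, vlfLoop (some k) (']' :: u) =
            if k - 1 < 0 then none else vlfLoop (some (k - 1)) u from fun u => by
          simp [vlfLoop]]
        rw [show ∀ u, vlfLoop (some k) (']' :: u) =
            if k - 1 < 0 then none else vlfLoop (some (k - 1)) u from fun u => by
          simp [vlfLoop]]
        by_cases hneg : k - 1 < 0
        · simp [hneg]
        · simp only [if_neg hneg]
          exact ih (k - 1)
      · rw [show vlfBrackets (c :: t) = vlfBrackets t from by
          simp [vlfBrackets, List.filter, isIn_singleton, hc1, hc2]]
        rw [show vlfLoop (some k) (c :: t) = vlfLoop (some k) t from by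
          simp [vlfLoop, hc1, hc2]]
        exact ih k

-- ===== VERDICT (by name: the statement is the Claim_ definition above) =====
theorem validate_list_format_spec : Claim_equal_validate_list_format := by
  intro s _
  unfold Spec_validate_list_format
  simp only [validate_list_format, validate_list_format_alt]
  by_cases hg : (!(PySem.Str.startswith (PySem.Str.strip s) "[" &&
      PySem.Str.endswith (PySem.Str.strip s) "]")) = true
  · rw [if_pos hg, if_pos hg]
  · rw [if_neg hg, if_neg hg]
    have hchain : vlfLoop (some 0) s.toList =
        vlfLoop (some 0) (vlfReduce (vlfBrackets s.toList)) := by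
      rw [vlfLoop_vlfReduce _ 0 le_rfl, vlfLoop_vlfBrackets]
    set r := vlfReduce (vlfBrackets s.toList) with hr
    by_cases hre : r = []
    · rw [hchain, hre]
      simp [vlfLoop]
    · have hne : vlfLoop (some 0) r ≠ some 0 := by
        apply vlfLoop_ne_zero r _ (not_infix_vlfReduce _) hre
        intro c hc
        have hmem : c ∈ vlfBrackets s.toList := mem_vlfReduce (hr ▸ hc)
        have : PySem.Chars.isIn [c] ['[', ']'] = true := (List.mem_filter.mp hmem).2
        rw [isIn_singleton] at this
        simpa using this
      rw [hchain]
      rw [show (r == ([] : List Char)) = false from by simp [hre]]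
      cases hv : vlfLoop (some 0) r with
      | none => rfl
      | some k =>
        have : ¬ (k = 0) := fun h => hne (by rw [hv, h])
        simp [this]
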